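-- pv_equiv track=rewrite | github.com/MigFeH/FI | Laboratorio/Primeras prácticas de examen/NOV30pr.py | nuestra_rstrip
-- ===== SOURCE A (Python) =====
-- def nuestra_rstrip(cad,x):
--     """Que devuelva otra cadena que sea cad, pero
--     quitando los caractéres x por el extremo derecho
--     y programarlo"""
-- # programarlo
--     res=[]
--     y=str(x)
--     for linea in cad:
--         res.append(linea)
--     while len(res)!=0 and res[len(res)-1]==y:
--         res.pop(len(res)-1)
--     cadf=''.join(res)
--     return cadf
-- ===== SOURCE B (Python) =====
-- def nuestra_rstrip(cad, x):
--     items = list(cad)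
--     y = str(x)
--     cut = 0
--     for i, c in enumerate(items):
--         if c != y:
--             cut = i + 1
--     return ''.join(items[:cut])
-- ===== Notes on version B (the rewrite author's own statement) =====
-- stated objective: alternative
-- what changed: Replaces A's copy-then-backward-pop (a while loop popping trailing matches off the end of a list) by a single forward pass that tracks 'cut', the position just past the last non-matching character, and returns the prefix items[:cut].
import Mathlib
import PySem

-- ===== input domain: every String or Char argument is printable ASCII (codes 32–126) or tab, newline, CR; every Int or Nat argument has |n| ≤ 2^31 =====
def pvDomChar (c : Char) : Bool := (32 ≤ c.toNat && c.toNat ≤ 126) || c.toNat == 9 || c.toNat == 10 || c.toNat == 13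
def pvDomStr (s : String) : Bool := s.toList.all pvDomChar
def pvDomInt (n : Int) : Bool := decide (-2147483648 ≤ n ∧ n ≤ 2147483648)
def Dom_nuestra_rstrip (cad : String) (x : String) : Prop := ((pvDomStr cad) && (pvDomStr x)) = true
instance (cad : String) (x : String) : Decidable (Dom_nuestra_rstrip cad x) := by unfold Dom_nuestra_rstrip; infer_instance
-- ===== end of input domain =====

-- B replaces A's copy-then-backward-pop loop by one forward pass tracking a kept-length 'cut'; objective: alternative decomposition, same cost.

-- ===== PORT A =====
-- the Python while loop: pop the last element while it equals y (each res element is a 1-char string, compared to y = str(x) = x)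
def pvPopA (x : String) (res : List Char) : List Char :=
  match h : res.getLast? with
  | none => res
  | some c =>
    if String.mk [c] == x then
      pvPopA x res.dropLast
    else res
termination_by res.length
decreasing_by
  have : res ≠ [] := by intro hn; simp [hn] at h
  cases res with
  | nil => exact absurd rfl this
  | cons a t => simp

def nuestra_rstrip (cad : String) (x : String) : String :=
  let res := cad.toList          -- for linea in cad: res.append(linea)
  let cadf := String.mk (pvPopA x res)
  cadf

-- ===== PORT B =====
-- the forward pass: cut becomes i+1 whenever items[i] != y
def pvCut (x : String) (items : List Char) : Int :=
  (PySem.List.enumerate items 0).foldl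
    (fun cut ic => if String.mk [ic.2] != x then ic.1 + 1 else cut) 0

def nuestra_rstrip_alt (cad : String) (x : String) : String :=
  let items := cad.toList
  let y := x                       -- y = str(x)
  let cut := pvCut y items
  String.mk (PySem.List.slice items none (some cut))

-- ===== PRECONDITION & SPEC =====
def Spec_nuestra_rstrip (cad : String) (x : String) (out : String) : Prop := out = nuestra_rstrip_alt cad x
instance (cad : String) (x : String) (out : String) : Decidable (Spec_nuestra_rstrip cad x out) := by unfold Spec_nuestra_rstrip; infer_instance

-- ===== CLAIM (what is proved, stated in full; the proofs are below) =====
def Claim_equal_nuestra_rstrip : Prop := ∀ (cad : String) (x : String), Dom_nuestra_rstrip cad x → Spec_nuestra_rstrip cad x (nuestra_rstrip cad x)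

-- ===== LEMMAS AND PROOFS =====

theorem pvPopA_concat (x : String) (l : List Char) (a : Char) :
    pvPopA x (l ++ [a]) = if String.mk [a] = x then pvPopA x l else l ++ [a] := by
  rw [pvPopA]
  split
  next h => simp [List.getLast?_concat] at h
  next c h =>
    rw [List.getLast?_concat] at h
    injection h with h
    subst h
    by_cases hp : String.mk [a] = x <;> simp [hp]

-- A's pop loop strips the maximal trailing run of matches
theorem pvPopA_eq_dropWhile (x : String) (l : List Char) :
    pvPopA x l = (l.reverse.dropWhile (fun c => String.mk [c] == x)).reverse := by
  induction l using List.reverseRecOn with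
  | nil => simp [pvPopA]
  | append_singleton l a ih =>
    rw [pvPopA_concat]
    by_cases hp : String.mk [a] = x
    · simp [hp, ih, List.dropWhile_cons]
    · simp [hp, List.dropWhile_cons]

theorem pvCut_concat (x : String) (l : List Char) (a : Char) :
    pvCut x (l ++ [a]) = if String.mk [a] = x then pvCut x l else (l.length : Int) + 1 := by
  unfold pvCut
  rw [PySem.List.enumerate_append, List.foldl_append]
  by_cases hp : String.mk [a] = x
  · simp [hp, PySem.List.enumerate_cons, PySem.List.enumerate_nil]
  · simp [hp, PySem.List.enumerate_cons, PySem.List.enumerate_nil]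

-- the cut is between 0 and the length
theorem pvCut_bounds (x : String) (l : List Char) :
    0 ≤ pvCut x l ∧ pvCut x l ≤ (l.length : Int) := by
  induction l using List.reverseRecOn with
  | nil => simp [pvCut, PySem.List.enumerate_nil]
  | append_singleton l a ih =>
    rw [pvCut_concat]
    by_cases hp : String.mk [a] = x <;> simp [hp] <;> omega

-- taking B's cut characters equals dropping the trailing matching run
theorem take_cut_eq (x : String) (l : List Char) :
    l.take (pvCut x l).toNat
      = (l.reverse.dropWhile (fun c => String.mk [c] == x)).reverse := by
  induction l using List.reverseRecOn with
  | nil => simp [pvCut, PySem.List.enumerate_nil]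
  | append_singleton l a ih =>
    rw [pvCut_concat]
    by_cases hp : String.mk [a] = x
    · have hb := pvCut_bounds x l
      rw [if_pos hp, List.take_append_of_le_length (by omega), ih]
      simp [List.dropWhile_cons, hp]
    · rw [if_neg hp]
      have h1 : ((l.length : Int) + 1).toNat = l.length + 1 := by omega
      rw [h1, List.take_of_length_le (by simp)]
      simp [List.dropWhile_cons, hp]

-- ===== VERDICT (by name: the statement is the Claim_ definition above) =====
theorem nuestra_rstrip_spec : Claim_equal_nuestra_rstrip := by
  intro cad x _
  unfold Spec_nuestra_rstrip nuestra_rstrip nuestra_rstrip_alt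
  have hb := pvCut_bounds x cad.toList
  show String.mk (pvPopA x cad.toList)
      = String.mk (PySem.List.slice cad.toList none (some (pvCut x cad.toList)))
  rw [PySem.List.slice_to _ hb.1, take_cut_eq, pvPopA_eq_dropWhile]
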